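-- pv_equiv track=rewrite | github.com/reichelu/copasul | src/copasul_utils.py | bg_counter
-- ===== SOURCE A (Python) =====
-- def bg_counter(x):
--
--     '''
--     bigram counter
--
--     Args:
--       x - list of strings
--
--     Returns:
--       c - dict
--         c[x_i][x_i-1]=count
--     '''
--
--     c = {}
--     for i in range(1, len(x)):
--         if x[i] not in c:
--             c[x[i]] = {}
--         if x[i-1] not in c[x[i]]:
--             c[x[i]][x[i-1]] = 0
--         c[x[i]][x[i-1]] += 1
--     return c
-- ===== SOURCE B (Python) =====
-- def bg_counter(x):
--     # Group-by decomposition: list the distinct current tokens, then for each one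
--     # run a dedicated scan collecting its predecessors and count them with list.count,
--     # instead of A's single incremental nested-dict accumulation.
--     pairs = list(zip(x[1:], x))
--     currents = []
--     for cur, _ in pairs:
--         if cur not in currents:
--             currents.append(cur)
--     c = {}
--     for cur in currents:
--         prevs = [p for (q, p) in pairs if q == cur]
--         inner = {}
--         for p in prevs:
--             if p not in inner:
--                 inner[p] = prevs.count(p)
--         c[cur] = inner
--     return c
-- ===== Notes on version B (the rewrite author's own statement) =====
-- stated objective: alternative
-- what changed: B replaces A's single incremental nested-dict pass with a group-by decomposition: it first lists the distinct current tokens, then for each one runs a dedicated scan over the bigram pairs collecting its predecessors and counts them with list.count.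
import Mathlib
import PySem

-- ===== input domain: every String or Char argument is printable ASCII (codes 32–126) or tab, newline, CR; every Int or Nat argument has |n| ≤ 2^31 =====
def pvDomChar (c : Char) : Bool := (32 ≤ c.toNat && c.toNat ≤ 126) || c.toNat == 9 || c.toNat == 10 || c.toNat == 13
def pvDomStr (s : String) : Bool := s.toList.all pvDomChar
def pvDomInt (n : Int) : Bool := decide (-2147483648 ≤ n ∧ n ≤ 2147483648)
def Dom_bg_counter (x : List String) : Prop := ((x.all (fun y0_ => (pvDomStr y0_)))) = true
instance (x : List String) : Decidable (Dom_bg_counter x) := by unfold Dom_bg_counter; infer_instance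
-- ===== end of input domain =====

-- B is a group-by decomposition: it lists the distinct current tokens, then for each one runs a
-- dedicated scan collecting its predecessors, counted with list.count, instead of A's single
-- incremental nested-dict accumulation (objective: alternative).

-- ===== PORT A =====
def bg_counter (x : List String) : List (String × List (String × Int)) :=
  let c : PySem.Dict String (PySem.Dict String Int) :=
    (PySem.List.pyRange 1 (x.length : Int) 1).foldl (fun c i =>
      c.modify (PySem.List.pyGetD x i "") PySem.Dict.empty
        (fun inner => inner.modify (PySem.List.pyGetD x (i - 1) "") 0 (· + 1)))
      PySem.Dict.empty
  c.items.map (fun p => (p.1, p.2.items))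

-- ===== PORT B =====
def bg_counter_alt (x : List String) : List (String × List (String × Int)) :=
  let pairs := (PySem.List.slice x (some 1) none).zip x
  let currents := pairs.foldl (fun acc p => if p.1 ∈ acc then acc else acc ++ [p.1]) []
  let c : PySem.Dict String (PySem.Dict String Int) :=
    currents.foldl (fun c cur =>
      let prevs := (pairs.filter (fun q => q.1 == cur)).map (·.2)
      let inner : PySem.Dict String Int :=
        prevs.foldl (fun d p =>
          if d.contains p then d else d.insert p ((prevs.count p : Int))) PySem.Dict.empty
      c.insert cur inner) PySem.Dict.empty
  c.items.map (fun p => (p.1, p.2.items))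

-- ===== PRECONDITION & SPEC =====
def Spec_bg_counter (x : List String) (out : List (String × List (String × Int))) : Prop := out = bg_counter_alt x
instance (x : List String) (out : List (String × List (String × Int))) : Decidable (Spec_bg_counter x out) := by unfold Spec_bg_counter; infer_instance

-- ===== CLAIM (what is proved, stated in full; the proofs are below) =====
def Claim_equal_bg_counter : Prop := ∀ (x : List String), Dom_bg_counter x → Spec_bg_counter x (bg_counter x)

-- ===== LEMMAS AND PROOFS =====
-- the common characterisation both ports are reduced to
def bgChar (x : List String) : List (String × List (String × Int)) :=
  let pairs := (PySem.List.slice x (some 1) none).zip x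
  (PySem.List.dedup (pairs.map (·.1))).map (fun cur =>
    (cur, ((PySem.List.dedup pairs).filter (fun p => p.1 == cur)).map
            (fun p => (p.2, (pairs.count (cur, p.2) : Int)))))

-- pairs as a range-map
theorem pairs_eq (x : List String) :
    (PySem.List.slice x (some 1) none).zip x
      = (List.range (x.length - 1)).map (fun k => (x.getD (k+1) "", x.getD k "")) := by
  rw [PySem.List.slice_from_one]
  apply List.ext_getElem
  · simp
  · intro k h1 h2
    simp at h1 h2 ⊢
    constructor
    · rw [List.getElem?_eq_getElem (by omega)]
      simp
    · rw [List.getElem?_eq_getElem (by omega)]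
      simp

-- A's loop over indices is the fold over that range
theorem afold_eq (x : List String) :
    (PySem.List.pyRange 1 (x.length : Int) 1).foldl (fun c i =>
      c.modify (PySem.List.pyGetD x i "") PySem.Dict.empty
        (fun inner => inner.modify (PySem.List.pyGetD x (i - 1) "") 0 (· + 1)))
      (PySem.Dict.empty : PySem.Dict String (PySem.Dict String Int))
    = (((PySem.List.slice x (some 1) none).zip x).foldl (fun c p =>
        c.modify p.1 PySem.Dict.empty
          (fun inner => inner.modify p.2 0 (· + 1)))
      (PySem.Dict.empty : PySem.Dict String (PySem.Dict String Int))) := by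
  rw [pairs_eq, PySem.List.pyRange_one, List.foldl_map, List.foldl_map]
  rw [show (((x.length:Int))-1).toNat = x.length - 1 by omega]
  congr 1
  funext c k
  have h1 : (1:Int) + (k:Nat) = ((k+1 : Nat) : Int) := by push_cast; ring
  rw [h1, PySem.List.pyGetD_natCast]
  rw [show ((k+1:Nat):Int) - 1 = ((k:Nat):Int) by push_cast; omega, PySem.List.pyGetD_natCast]

theorem getD_build (l : List (String × String)) (d : PySem.Dict String (PySem.Dict String Int)) (cur : String) :
    (l.foldl (fun c p => c.modify p.1 PySem.Dict.empty (fun inner => inner.modify p.2 0 (· + 1))) d).getD cur PySem.Dict.empty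
    = ((l.filter (fun p => p.1 == cur)).map (·.2)).foldl (fun inner b => inner.modify b 0 (· + 1)) (d.getD cur PySem.Dict.empty) := by
  induction l generalizing d with
  | nil => simp
  | cons p l ih =>
    simp only [List.foldl_cons, ih, List.filter_cons]
    by_cases h : p.1 = cur
    · subst h; simp [PySem.Dict.getD_modify_self]
    · simp [PySem.Dict.getD_modify, h, Ne.symm h]

theorem dedup_filter_map (l : List (String × String)) (cur : String) :
    PySem.Set.ofList ((l.filter (fun p => p.1 == cur)).map (·.2))
    = ((PySem.Set.ofList l).filter (fun p => p.1 == cur)).map (·.2) := by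
  induction l using List.reverseRecOn with
  | nil => simp
  | append_singleton l p ih =>
    by_cases h : p.1 = cur
    · have hf : ∀ (m : List (String × String)),
          (m ++ [p]).filter (fun q => q.1 == cur) = m.filter (fun q => q.1 == cur) ++ [p] := by
        intro m; simp [List.filter_append, h]
      rw [hf, List.map_append]
      simp only [List.map_cons, List.map_nil]
      rw [PySem.Set.ofList_append_singleton (α := String), ih,
          PySem.Set.ofList_append_singleton (α := String × String)]
      by_cases hm : p ∈ l
      · rw [PySem.Set.add_of_mem ((PySem.Set.mem_ofList _ _).2 hm), PySem.Set.add_of_mem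
          (List.mem_map.2 ⟨p, List.mem_filter.2 ⟨(PySem.Set.mem_ofList _ _).2 hm, by simp [h]⟩, rfl⟩)]
      · have h2 : p.2 ∉ ((PySem.Set.ofList l).filter (fun q => q.1 == cur)).map (fun q => q.2) := by
          intro hc
          obtain ⟨q, hq, hq2⟩ := List.mem_map.1 hc
          obtain ⟨hql, hq1⟩ := List.mem_filter.1 hq
          apply hm
          have hq1' : q.1 = cur := by simpa using hq1
          have hqp : q = p := Prod.ext (by rw [hq1', h]) hq2
          exact hqp ▸ (PySem.Set.mem_ofList _ _).1 hql
        rw [PySem.Set.add_of_not_mem (fun hc => hm ((PySem.Set.mem_ofList _ _).1 hc)),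
            PySem.Set.add_of_not_mem h2, hf, List.map_append]
        simp
    · have hf : ∀ (m : List (String × String)),
          (m ++ [p]).filter (fun q => q.1 == cur) = m.filter (fun q => q.1 == cur) := by
        intro m; simp [List.filter_append, h]
      rw [hf, ih, PySem.Set.ofList_append_singleton]
      by_cases hm : p ∈ l
      · rw [PySem.Set.add_of_mem ((PySem.Set.mem_ofList _ _).2 hm)]
      · rw [PySem.Set.add_of_not_mem (fun hc => hm ((PySem.Set.mem_ofList _ _).1 hc)), hf]

theorem count_filter_map (l : List (String × String)) (cur prev : String) :
    ((l.filter (fun p => p.1 == cur)).map (·.2)).count prev = l.count (cur, prev) := by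
  induction l with
  | nil => simp
  | cons p l ih =>
    rcases p with ⟨a, b⟩
    simp only [List.filter_cons, List.count_cons]
    by_cases h : a = cur
    · by_cases h2 : b = prev <;> simp [h, h2, ih, Prod.ext_iff]
    · simp [h, ih, Prod.ext_iff]

theorem a_char (x : List String) : bg_counter x = bgChar x := by
  simp only [bg_counter, bgChar]
  rw [afold_eq x]
  have hnd : (((PySem.List.slice x (some 1) none).zip x).foldl (fun c p =>
      c.modify p.1 PySem.Dict.empty (fun inner => inner.modify p.2 0 (· + 1)))
      (PySem.Dict.empty : PySem.Dict String (PySem.Dict String Int))).keys.Nodup := by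
    exact PySem.Dict.nodup_keys_foldl_modify_key _ (fun p => p.1) _
      (fun (_ : PySem.Dict String (PySem.Dict String Int)) (p : String × String) =>
        fun (inner : PySem.Dict String Int) => inner.modify p.2 0 (· + 1)) _ (by simp)
  rw [PySem.Dict.items_eq_map_keys _ hnd PySem.Dict.empty, List.map_map,
      PySem.Dict.keys_foldl_modify_key]
  simp only [PySem.Dict.keys_empty, PySem.Set.update_nil_left, PySem.List.dedup_eq_ofList]
  congr 1
  funext cur
  simp only [Function.comp]
  rw [getD_build, PySem.Dict.getD_empty, ← PySem.Dict.counter_eq_foldl,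
      PySem.Dict.items_counter, dedup_filter_map, List.map_map]
  congr 1
  apply List.map_congr_left
  intro p _hp
  simp [count_filter_map]

-- B's insert-if-absent loop builds exactly the first-occurrence table with the given values
theorem items_foldl_insert_if_absent (v : String → Int) (l : List String) :
    ((l.foldl (fun d p => if d.contains p then d else d.insert p (v p))
        (PySem.Dict.empty : PySem.Dict String Int)).items
      = (PySem.Set.ofList l).map (fun p => (p, v p)))
    ∧ (l.foldl (fun d p => if d.contains p then d else d.insert p (v p))
        (PySem.Dict.empty : PySem.Dict String Int)).keys = PySem.Set.ofList l := by
  induction l using List.reverseRecOn with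
  | nil => exact ⟨rfl, rfl⟩
  | append_singleton l p ih =>
    obtain ⟨hitems, hkeys⟩ := ih
    rw [List.foldl_append, List.foldl_cons, List.foldl_nil,
        PySem.Set.ofList_append_singleton]
    by_cases hm : p ∈ l
    · have hc : (l.foldl (fun d p => if d.contains p then d else d.insert p (v p))
          (PySem.Dict.empty : PySem.Dict String Int)).contains p = true := by
        rw [PySem.Dict.contains_eq_decide_mem_keys, hkeys]
        simp [(PySem.Set.mem_ofList _ _).2 hm]
      rw [hc, if_pos rfl, PySem.Set.add_of_mem ((PySem.Set.mem_ofList _ _).2 hm)]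
      exact ⟨hitems, hkeys⟩
    · have hc : (l.foldl (fun d p => if d.contains p then d else d.insert p (v p))
          (PySem.Dict.empty : PySem.Dict String Int)).contains p = false := by
        rw [PySem.Dict.contains_eq_decide_mem_keys, hkeys]
        simp
        exact hm
      rw [hc]
      simp only [Bool.false_eq_true, if_false]
      rw [PySem.Set.add_of_not_mem (fun hc => hm ((PySem.Set.mem_ofList _ _).1 hc)),
          PySem.Dict.items_insert_of_not_contains _ _ hc, hitems,
          PySem.Dict.keys_insert_of_not_contains _ _ hc, hkeys, List.map_append]
      simp

-- B's currents loop is the ordered dedup of the first components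
theorem currents_eq (l : List (String × String)) :
    l.foldl (fun acc p => if p.1 ∈ acc then acc else acc ++ [p.1]) []
      = PySem.Set.ofList (l.map (·.1)) := by
  rw [PySem.Set.ofList_eq_foldl, List.foldl_map]
  refine PySem.List.foldl_congr_mem _ _ _ _ ?_
  intro acc p _
  simp [PySem.Set.add]

theorem b_char (x : List String) : bg_counter_alt x = bgChar x := by
  simp only [bg_counter_alt, bgChar]
  rw [currents_eq]
  have hnodup : (PySem.Set.ofList (((PySem.List.slice x (some 1) none).zip x).map (·.1))).Nodup :=
    PySem.Set.nodup_ofList _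
  have hitems := PySem.Dict.items_foldl_insert_fresh
    (PySem.Set.ofList (((PySem.List.slice x (some 1) none).zip x).map (·.1)))
    (fun cur => cur)
    (fun cur =>
      let prevs := (((PySem.List.slice x (some 1) none).zip x).filter (fun q => q.1 == cur)).map (·.2)
      prevs.foldl (fun d p =>
        if d.contains p then d else d.insert p ((prevs.count p : Int))) PySem.Dict.empty)
    (PySem.Dict.empty : PySem.Dict String (PySem.Dict String Int))
    (by intro a _; simp) (by simp only [List.map_id_fun']; exact hnodup)
  rw [hitems]
  rw [show (PySem.Dict.empty : PySem.Dict String (PySem.Dict String Int)).items = [] from rfl,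
      List.nil_append, List.map_map, PySem.List.dedup_eq_ofList]
  apply List.map_congr_left
  intro cur _
  simp only [Function.comp]
  congr 1
  rw [(items_foldl_insert_if_absent _ _).1, dedup_filter_map, List.map_map]
  apply List.map_congr_left
  intro p _hp
  simp only [Function.comp]
  rw [count_filter_map]

theorem main_eq (x : List String) : bg_counter x = bg_counter_alt x :=
  (a_char x).trans (b_char x).symm

-- ===== VERDICT (by name: the statement is the Claim_ definition above) =====
theorem bg_counter_spec : Claim_equal_bg_counter := by
  intro x _
  unfold Spec_bg_counter
  exact main_eq x
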